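-- pv_equiv track=rewrite | github.com/marcopetix/virgo-o4-extractor | scripts/gwf_to_h5_incremental.py | _runs_from_sorted_indices
-- ===== SOURCE A (Python) =====
-- from typing import Optional, List, Tuple, Set, Dict, Any
--
-- def _runs_from_sorted_indices(idxs: List[int]) -> List[List[int]]:
--     """Compress a sorted list of integers into runs: [[start, length], ...]."""
--     if not idxs:
--         return []
--     runs: List[List[int]] = []
--     start = prev = idxs[0]
--     length = 1
--     for k in idxs[1:]:
--         if k == prev + 1:
--             length += 1
--         else:
--             runs.append([start, length])
--             start, length = k, 1
--         prev = k
--     runs.append([start, length])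
--     return runs
-- ===== SOURCE B (Python) =====
-- from typing import List
--
--
-- def _merge_runs(left: List[List[int]], right: List[List[int]]) -> List[List[int]]:
--     """Merge run lists of two adjacent segments, coalescing at the boundary."""
--     ls, ll = left[-1]
--     rs, rl = right[0]
--     if rs == ls + ll:
--         return left[:-1] + [[ls, ll + rl]] + right[1:]
--     return left + right
--
--
-- def _runs_from_sorted_indices(idxs: List[int]) -> List[List[int]]:
--     """Compress a sorted list of integers into runs: [[start, length], ...].
--
--     Divide and conquer: runs of each half, merged at the boundary."""
--     if not idxs:
--         return []
--
--     def rec(lo: int, hi: int) -> List[List[int]]: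
--         if hi - lo <= 1:
--             return [[idxs[lo], 1]]
--         mid = (lo + hi) // 2
--         return _merge_runs(rec(lo, mid), rec(mid, hi))
--
--     return rec(0, len(idxs))
-- ===== Notes on version B (the rewrite author's own statement) =====
-- stated objective: alternative
-- what changed: Replaces A's single left-to-right start/prev/length state machine by a divide-and-conquer recursion: split the index range in half, compute each half's runs recursively, and merge the two run lists by coalescing the left's last run with the right's first run when adjacent.
import Mathlib
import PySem

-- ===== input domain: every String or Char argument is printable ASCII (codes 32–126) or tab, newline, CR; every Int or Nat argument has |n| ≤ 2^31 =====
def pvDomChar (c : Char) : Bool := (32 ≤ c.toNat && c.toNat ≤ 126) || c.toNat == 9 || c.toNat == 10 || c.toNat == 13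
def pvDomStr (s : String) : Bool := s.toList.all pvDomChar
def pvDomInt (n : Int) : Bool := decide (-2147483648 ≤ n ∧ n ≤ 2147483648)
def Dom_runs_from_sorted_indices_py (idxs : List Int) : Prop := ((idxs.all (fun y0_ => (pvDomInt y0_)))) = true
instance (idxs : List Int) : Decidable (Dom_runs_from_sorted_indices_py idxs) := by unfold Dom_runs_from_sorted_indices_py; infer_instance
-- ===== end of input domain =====

-- B replaces A's linear start/prev/length state machine by a divide-and-conquer
-- recursion that halves the index range and coalesces runs at the boundary (alternative).

-- ===== PORT A =====
-- loop body; state (runs, start, prev, length) as in the Python loop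
def pvAStep (s : List (List Int) × Int × Int × Int) (k : Int) :
    List (List Int) × Int × Int × Int :=
  let (runs, start, prev, length) := s
  if k = prev + 1 then (runs, start, k, length + 1)
  else (runs ++ [[start, length]], k, k, 1)

def runs_from_sorted_indices_py (idxs : List Int) : List (List Int) :=
  match idxs with
  | [] => []
  | x :: rest =>
    let st := rest.foldl pvAStep ([], x, x, 1)
    st.1 ++ [[st.2.1, st.2.2.2]]

-- ===== PORT B =====
-- _merge_runs: left[-1] → getLastD, right[0] → headD, left[:-1] → dropLast, right[1:] → tail
-- (defaults never used: rec's run lists are nonempty lists of two-element runs)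
def pvMergeRuns (left right : List (List Int)) : List (List Int) :=
  let lr := left.getLastD [0, 0]
  let ls := lr.getD 0 0
  let ll := lr.getD 1 0
  let rf := right.headD [0, 0]
  let rs := rf.getD 0 0
  let rl := rf.getD 1 0
  if rs = ls + ll then left.dropLast ++ [[ls, ll + rl]] ++ right.tail
  else left ++ right

-- rec(lo, hi); lo/hi are nonnegative in-range offsets in the Python, so Nat is faithful;
-- idxs[lo] (always in range when called) → getD lo 0; (lo+hi)//2 on Nat = Python floor division
def pvRec (idxs : List Int) (lo hi : Nat) : List (List Int) :=
  if hi - lo ≤ 1 then [[idxs.getD lo 0, 1]]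
  else pvMergeRuns (pvRec idxs lo ((lo + hi) / 2)) (pvRec idxs ((lo + hi) / 2) hi)
termination_by hi - lo
decreasing_by all_goals omega

def runs_from_sorted_indices_py_alt (idxs : List Int) : List (List Int) :=
  if idxs = [] then [] else pvRec idxs 0 idxs.length

-- ===== PRECONDITION & SPEC =====
def Spec_runs_from_sorted_indices_py (idxs : List Int) (out : List (List Int)) : Prop := out = runs_from_sorted_indices_py_alt idxs
instance (idxs : List Int) (out : List (List Int)) : Decidable (Spec_runs_from_sorted_indices_py idxs out) := by unfold Spec_runs_from_sorted_indices_py; infer_instance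

-- ===== CLAIM (what is proved, stated in full; the proofs are below) =====
def Claim_equal_runs_from_sorted_indices_py : Prop := ∀ (idxs : List Int), Dom_runs_from_sorted_indices_py idxs → Spec_runs_from_sorted_indices_py idxs (runs_from_sorted_indices_py idxs)

-- ===== LEMMAS AND PROOFS =====

-- canonical recursion both ports are reduced to
def pvCanon (start len : Int) : List Int → List (List Int)
  | [] => [[start, len]]
  | k :: rest => if k = start + len then pvCanon start (len + 1) rest
                 else [start, len] :: pvCanon k 1 rest

-- length of the leading consecutive run starting at v
def pvCnt (v : Int) : List Int → Int
  | [] => 0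
  | k :: l => if k = v then pvCnt (v + 1) l + 1 else 0

-- remainder after the leading consecutive run starting at v
def pvRem (v : Int) : List Int → List Int
  | [] => []
  | k :: l => if k = v then pvRem (v + 1) l else k :: l

theorem pvCanon_char (l : List Int) : ∀ start len : Int,
    pvCanon start len l =
      [start, len + pvCnt (start + len) l] ::
        (match pvRem (start + len) l with
         | [] => []
         | k :: l' => pvCanon k 1 l') := by
  induction l with
  | nil => intro s n; simp [pvCanon, pvCnt, pvRem]
  | cons k l ih =>
    intro s n
    by_cases h : k = s + n
    · simp [pvCanon, pvCnt, pvRem, h, ih s (n + 1)]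
      constructor
      · ring_nf
      · have : s + n + 1 = s + (n + 1) := by ring
        rw [this]
    · simp [pvCanon, pvCnt, pvRem, h]

theorem pvCanon_ne_nil (l : List Int) : ∀ s n : Int, pvCanon s n l ≠ [] := by
  induction l with
  | nil => intro s n; simp [pvCanon]
  | cons k l ih =>
    intro s n
    by_cases h : k = s + n
    · simpa [pvCanon, h] using ih s (n + 1)
    · simp [pvCanon, h]

-- A-side: the fold computes pvCanon
theorem pvA_fold (l : List Int) : ∀ (runs : List (List Int)) (start len : Int),
    (let st := l.foldl pvAStep (runs, start, start + len - 1, len)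
     st.1 ++ [[st.2.1, st.2.2.2]]) = runs ++ pvCanon start len l := by
  induction l with
  | nil => intro runs s n; simp [pvCanon]
  | cons k l ih =>
    intro runs s n
    simp only [List.foldl_cons]
    by_cases h : k = s + n - 1 + 1
    · have hk : k = s + n := by omega
      have hstep : pvAStep (runs, s, s + n - 1, n) k = (runs, s, s + (n + 1) - 1, n + 1) := by
        simp [pvAStep, h]; omega
      rw [hstep, ih runs s (n + 1)]
      simp [pvCanon, hk]
    · have hk : ¬ (k = s + n) := by omega
      have hstep : pvAStep (runs, s, s + n - 1, n) k = (runs ++ [[s, n]], k, k + 1 - 1, 1) := by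
        simp [pvAStep]; omega
      rw [hstep, ih (runs ++ [[s, n]]) k 1]
      simp [pvCanon, hk]

theorem pvA_canon (x : Int) (rest : List Int) :
    runs_from_sorted_indices_py (x :: rest) = pvCanon x 1 rest := by
  have h := pvA_fold rest [] x 1
  simpa [runs_from_sorted_indices_py] using h

-- merging is insensitive to a prefix of the left run list
theorem pvMergeRuns_cons (r : List Int) (L R : List (List Int)) (h : L ≠ []) :
    pvMergeRuns (r :: L) R = r :: pvMergeRuns L R := by
  cases L with
  | nil => exact absurd rfl h
  | cons a L' =>
    simp only [pvMergeRuns, List.getLastD_cons, List.dropLast_cons_of_ne_nil (by simp : a :: L' ≠ [])]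
    split_ifs <;> simp

-- the boundary merge is exactly pvCanon on the concatenation
theorem pvMerge_canon (l1 : List Int) : ∀ (s n k : Int) (rest : List Int),
    pvCanon s n (l1 ++ k :: rest) = pvMergeRuns (pvCanon s n l1) (pvCanon k 1 rest) := by
  induction l1 with
  | nil =>
    intro s n k rest
    rw [List.nil_append]
    have hR := pvCanon_char rest k 1
    by_cases h : k = s + n
    · have hL : pvCanon s (n + 1) rest =
          [s, (n + 1) + pvCnt (s + (n + 1)) rest] ::
            (match pvRem (s + (n + 1)) rest with
             | [] => []
             | k' :: l' => pvCanon k' 1 l') := pvCanon_char rest s (n + 1)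
      have hkk : k + 1 = s + (n + 1) := by omega
      rw [show pvCanon s n (k :: rest) = pvCanon s (n + 1) rest by simp [pvCanon, h], hL]
      rw [hR, pvMergeRuns]
      simp only [pvCanon, List.getLastD_cons, List.getLastD_nil, List.headD_cons]
      rw [hkk] at *
      simp [h]
      ring
    · rw [show pvCanon s n (k :: rest) = [s, n] :: pvCanon k 1 rest by simp [pvCanon, h]]
      rw [hR, pvMergeRuns]
      simp only [List.headD_cons]
      simp [pvCanon, h]
  | cons x l1' ih =>
    intro s n k rest
    by_cases h : x = s + n
    · rw [List.cons_append,
        show pvCanon s n (x :: (l1' ++ k :: rest)) = pvCanon s (n + 1) (l1' ++ k :: rest) by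
          simp [pvCanon, h],
        show pvCanon s n (x :: l1') = pvCanon s (n + 1) l1' by simp [pvCanon, h]]
      exact ih s (n + 1) k rest
    · rw [List.cons_append,
        show pvCanon s n (x :: (l1' ++ k :: rest)) = [s, n] :: pvCanon x 1 (l1' ++ k :: rest) by
          simp [pvCanon, h],
        show pvCanon s n (x :: l1') = [s, n] :: pvCanon x 1 l1' by simp [pvCanon, h],
        pvMergeRuns_cons _ _ _ (pvCanon_ne_nil l1' x 1)]
      rw [ih x 1 k rest]

-- runs of a segment, canonical form
def pvRunsOf : List Int → List (List Int)
  | [] => []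
  | x :: r => pvCanon x 1 r

theorem pvRunsOf_append (l1 l2 : List Int) (h1 : l1 ≠ []) (h2 : l2 ≠ []) :
    pvRunsOf (l1 ++ l2) = pvMergeRuns (pvRunsOf l1) (pvRunsOf l2) := by
  cases l1 with
  | nil => exact absurd rfl h1
  | cons a t1 =>
    cases l2 with
    | nil => exact absurd rfl h2
    | cons b t2 =>
      show pvCanon a 1 (t1 ++ b :: t2) = _
      rw [pvMerge_canon t1 a 1 b t2]
      rfl

theorem pvRec_eq (idxs : List Int) : ∀ (fuel lo hi : Nat), hi - lo ≤ fuel → lo < hi →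
    hi ≤ idxs.length →
    pvRec idxs lo hi = pvRunsOf ((idxs.drop lo).take (hi - lo)) := by
  intro fuel
  induction fuel with
  | zero => intro lo hi h hlt _; omega
  | succ f ih =>
    intro lo hi hfuel hlt hle
    rw [pvRec]
    by_cases hb : hi - lo ≤ 1
    · have h1 : hi - lo = 1 := by omega
      have hlo : lo < idxs.length := by omega
      have hseg : (idxs.drop lo).take (hi - lo) = [idxs[lo]] := by
        rw [h1, List.take_one, List.head?_drop, List.getElem?_eq_getElem hlo]; rfl
      have hgd : idxs.getD lo 0 = idxs[lo] := by
        simp [List.getD_eq_getElem?_getD, List.getElem?_eq_getElem hlo]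
      rw [if_pos hb, hseg, hgd]
      simp [pvRunsOf, pvCanon]
    · rw [if_neg hb]
      have hmid1 : lo < (lo + hi) / 2 := by omega
      have hmid2 : (lo + hi) / 2 < hi := by omega
      rw [ih lo ((lo + hi) / 2) (by omega) hmid1 (by omega),
          ih ((lo + hi) / 2) hi (by omega) hmid2 hle]
      have hsplit : (idxs.drop lo).take (hi - lo) =
          (idxs.drop lo).take ((lo + hi) / 2 - lo) ++
            (idxs.drop ((lo + hi) / 2)).take (hi - (lo + hi) / 2) := by
        rw [show hi - lo = ((lo + hi) / 2 - lo) + (hi - (lo + hi) / 2) by omega,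
            List.take_add, List.drop_drop,
            show lo + ((lo + hi) / 2 - lo) = (lo + hi) / 2 from by omega]
      rw [hsplit, pvRunsOf_append]
      · have : ((idxs.drop lo).take ((lo + hi) / 2 - lo)).length = (lo + hi) / 2 - lo := by
          simp; omega
        intro hnil; rw [hnil] at this; simp at this; omega
      · have : ((idxs.drop ((lo + hi) / 2)).take (hi - (lo + hi) / 2)).length
            = hi - (lo + hi) / 2 := by simp; omega
        intro hnil; rw [hnil] at this; simp at this; omega

-- ===== VERDICT (by name: the statement is the Claim_ definition above) =====
theorem runs_from_sorted_indices_py_spec : Claim_equal_runs_from_sorted_indices_py := by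
  intro idxs _
  show runs_from_sorted_indices_py idxs = runs_from_sorted_indices_py_alt idxs
  cases idxs with
  | nil => rfl
  | cons x rest =>
    rw [pvA_canon, runs_from_sorted_indices_py_alt, if_neg (by simp)]
    rw [pvRec_eq (x :: rest) (x :: rest).length 0 (x :: rest).length (by omega) (by simp) le_rfl]
    simp [pvRunsOf]
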